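-- pv_equiv track=rewrite | github.com/Bluemaster05/College-Classes | 215-CPTR/Lab/9-17-24/Reallab/lab2.py | rows_from_puzzle
-- ===== SOURCE A (Python) =====
-- rootdict = {
--     "36": 6,
--     "25": 5,
--     "16": 4,
--     "9": 3,
--     "4": 2
-- }
--
-- def rows_from_puzzle(puzzle : str) -> str:
--     r"""Returns a string with a newline between rows of the puzzle.
--     >>> rows_from_puzzle("1-23")
--     '1-\n23'
--     >>> rows_from_puzzle("-123")
--     '-1\n23'
--     >>> rows_from_puzzle("-12345678")
--     '-12\n345\n678'
--     >>> rows_from_puzzle("-FEDCBA987654321")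
--     '-FED\nCBA9\n8765\n4321'
--     """
--     numRows = rootdict[str(len(puzzle))]
--     puzzleList = list(puzzle)
--     puzzlePrint = ""
--     rowlimit = 0
--     iteration = 0
--     for item in puzzle:
--         if iteration == len(puzzleList) - 1:
--             puzzlePrint += item
--         elif rowlimit < numRows - 1:
--             puzzlePrint += item
--             iteration += 1
--             rowlimit += 1
--         elif rowlimit == numRows - 1:
--             puzzlePrint += item + "\n"
--             iteration += 1
--             rowlimit = 0
--     return puzzlePrint
-- ===== SOURCE B (Python) =====
-- rootdict = {
--     "36": 6,
--     "25": 5,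
--     "16": 4,
--     "9": 3,
--     "4": 2
-- }
--
-- def rows_from_puzzle(puzzle : str) -> str:
--     """Slice the puzzle into rows of numRows characters and join them with newlines."""
--     numRows = rootdict[str(len(puzzle))]
--     return "\n".join(puzzle[i:i + numRows] for i in range(0, len(puzzle), numRows))
-- ===== Notes on version B (the rewrite author's own statement) =====
-- stated objective: simpler
-- what changed: Replaces A's per-character state machine (rowlimit/iteration counters with a last-character special case) by slicing the string into numRows-sized blocks over chunk start indices and joining them with newlines; the rootdict lookup is kept so non-square lengths still raise KeyError.
import Mathlib
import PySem

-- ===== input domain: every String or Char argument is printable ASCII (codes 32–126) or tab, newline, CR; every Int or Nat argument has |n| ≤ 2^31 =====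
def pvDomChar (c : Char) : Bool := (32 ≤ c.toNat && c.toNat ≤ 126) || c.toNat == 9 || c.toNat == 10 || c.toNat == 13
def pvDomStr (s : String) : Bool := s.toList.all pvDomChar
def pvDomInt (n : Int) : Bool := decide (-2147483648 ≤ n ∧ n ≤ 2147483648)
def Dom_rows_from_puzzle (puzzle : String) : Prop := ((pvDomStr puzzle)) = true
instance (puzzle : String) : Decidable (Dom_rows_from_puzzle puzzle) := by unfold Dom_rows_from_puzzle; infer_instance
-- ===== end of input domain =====

-- B replaces A's per-character counter state machine by slicing the string into
-- numRows-sized blocks and joining them with newlines (objective: simpler).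

-- ===== PORT A =====
-- module-level constant shared by both Pythons
def rootdict : PySem.Dict String Int :=
  PySem.Dict.ofList [("36", 6), ("25", 5), ("16", 4), ("9", 3), ("4", 2)]

-- one iteration of A's for-loop (state: puzzlePrint, rowlimit, iteration)
def stepA (n numRows : Int) (st : List Char × Int × Int) (item : Char) : List Char × Int × Int :=
  if st.2.2 = n - 1 then (st.1 ++ [item], st.2.1, st.2.2)
  else if st.2.1 < numRows - 1 then (st.1 ++ [item], st.2.1 + 1, st.2.2 + 1)
  else if st.2.1 = numRows - 1 then (st.1 ++ [item] ++ ['\n'], 0, st.2.2 + 1)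
  else st

def rows_from_puzzle (puzzle : String) : String :=
  match PySem.Dict.get? rootdict (PySem.Int.toStr (PySem.Str.len puzzle)) with
  | none => ""   -- Python raises KeyError here; excluded by Pre_
  | some numRows =>
      let puzzleList := puzzle.toList
      String.ofList
        (puzzleList.foldl (stepA (PySem.List.len puzzleList) numRows) ([], 0, 0)).1

-- ===== PORT B =====
def rows_from_puzzle_alt (puzzle : String) : String :=
  match PySem.Dict.get? rootdict (PySem.Int.toStr (PySem.Str.len puzzle)) with
  | none => ""   -- Python raises KeyError here; excluded by Pre_
  | some numRows =>
      PySem.Str.join "\n"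
        ((PySem.List.pyRange 0 (PySem.Str.len puzzle) numRows).map
          (fun i => PySem.Str.slice puzzle (some i) (some (i + numRows))))

-- ===== PRECONDITION & SPEC =====
-- Pre_ excludes exactly the lengths on which A's rootdict lookup raises KeyError
-- (B performs the same lookup and raises the same KeyError there).
def Pre_rows_from_puzzle (puzzle : String) : Prop :=
  puzzle.toList.length = 4 ∨ puzzle.toList.length = 9 ∨ puzzle.toList.length = 16 ∨
  puzzle.toList.length = 25 ∨ puzzle.toList.length = 36

instance (puzzle : String) : Decidable (Pre_rows_from_puzzle puzzle) := by
  unfold Pre_rows_from_puzzle; infer_instance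

def pvWitness_rows_from_puzzle : String := "1-23"

def Spec_rows_from_puzzle (puzzle : String) (out : String) : Prop := out = rows_from_puzzle_alt puzzle
instance (puzzle : String) (out : String) : Decidable (Spec_rows_from_puzzle puzzle out) := by unfold Spec_rows_from_puzzle; infer_instance

-- ===== CLAIM (what is proved, stated in full; the proofs are below) =====
def Claim_equal_rows_from_puzzle : Prop := ∀ (puzzle : String), Dom_rows_from_puzzle puzzle → Pre_rows_from_puzzle puzzle → Spec_rows_from_puzzle puzzle (rows_from_puzzle puzzle)

-- ===== LEMMAS AND PROOFS =====

-- A run of A's loop that stays strictly inside a row: every character is appended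
-- plainly and both counters advance by one.
lemma foldl_stepA_run (n mI : Int) (cs : List Char) :
    ∀ (acc : List Char) (r i : Int),
      r + cs.length ≤ mI - 1 → i + cs.length ≤ n - 1 →
      cs.foldl (stepA n mI) (acc, r, i) = (acc ++ cs, r + cs.length, i + cs.length) := by
  induction cs with
  | nil => intro acc r i _ _; simp
  | cons c cs ih =>
      intro acc r i h1 h2
      simp only [List.length_cons] at h1 h2
      push_cast at h1 h2
      simp only [List.foldl_cons]
      rw [show stepA n mI (acc, r, i) c = (acc ++ [c], r + 1, i + 1) by
        simp only [stepA]
        rw [if_neg (by omega), if_pos (by omega)]]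
      rw [ih (acc ++ [c]) (r + 1) (i + 1) (by omega) (by omega)]
      simp only [List.length_cons, List.append_assoc, List.singleton_append,
        Prod.mk.injEq, true_and]
      push_cast
      constructor <;> omega

-- A full row that is NOT the last one: A appends the row and a newline, resets rowlimit.
lemma foldl_stepA_chunk_mid (n mI : Int) (c : List Char) (acc : List Char) (i : Int)
    (hc : (c.length : Int) = mI) (hm : 2 ≤ mI) (hi : i + mI < n) :
    c.foldl (stepA n mI) (acc, 0, i) = (acc ++ c ++ ['\n'], 0, i + mI) := by
  rcases (List.eq_nil_or_concat c) with h | ⟨c', d, rfl⟩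
  · subst h; simp at hc; omega
  · have hlen : (c'.length : Int) = mI - 1 := by
      simp only [List.concat_eq_append, List.length_append, List.length_cons,
        List.length_nil] at hc
      push_cast at hc; omega
    rw [List.concat_eq_append, List.foldl_append,
        foldl_stepA_run n mI c' acc 0 i (by omega) (by omega)]
    simp only [List.foldl_cons, List.foldl_nil]
    rw [show stepA n mI (acc ++ c', 0 + (c'.length : Int), i + (c'.length : Int)) d
          = (acc ++ c' ++ [d] ++ ['\n'], 0, i + mI) by
      simp only [stepA]
      rw [if_neg (by omega), if_neg (by omega), if_pos (by omega)]
      simp only [Prod.mk.injEq, List.append_assoc, true_and]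
      omega]
    simp

-- The LAST full row: its final character is the last character of the puzzle,
-- which A appends without a newline.
lemma foldl_stepA_chunk_last (n mI : Int) (c : List Char) (acc : List Char) (i : Int)
    (hc : (c.length : Int) = mI) (hm : 2 ≤ mI) (hi : i + mI = n) :
    (c.foldl (stepA n mI) (acc, 0, i)).1 = acc ++ c := by
  rcases (List.eq_nil_or_concat c) with h | ⟨c', d, rfl⟩
  · subst h; simp at hc; omega
  · have hlen : (c'.length : Int) = mI - 1 := by
      simp only [List.concat_eq_append, List.length_append, List.length_cons,
        List.length_nil] at hc
      push_cast at hc; omega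
    rw [List.concat_eq_append, List.foldl_append,
        foldl_stepA_run n mI c' acc 0 i (by omega) (by omega)]
    simp only [List.foldl_cons, List.foldl_nil]
    rw [show stepA n mI (acc ++ c', 0 + (c'.length : Int), i + (c'.length : Int)) d
          = (acc ++ c' ++ [d], 0 + (c'.length : Int), i + (c'.length : Int)) by
      simp only [stepA]
      rw [if_pos (by omega)]]
    simp

-- join over a nonempty tail
lemma join_cons_of_ne_nil (sep p : List Char) (L : List (List Char)) (h : L ≠ []) :
    PySem.Chars.join sep (p :: L) = p ++ sep ++ PySem.Chars.join sep L := by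
  cases L with
  | nil => exact absurd rfl h
  | cons q L' => exact PySem.Chars.join_cons_cons sep p q L'

-- Main invariant: from position i with k full rows of m characters left, A's loop
-- appends exactly the newline-join of those k rows.
lemma loop_eq_join (m : Nat) (hm : 2 ≤ m) :
    ∀ (k i : Nat) (full acc : List Char), 1 ≤ k → i + k * m = full.length →
      ((full.drop i).foldl (stepA (full.length : Int) (m : Int)) (acc, 0, (i : Int))).1
        = acc ++ PySem.Chars.join ['\n']
            ((List.range k).map (fun t => (full.drop (i + t * m)).take m)) := by
  intro k
  induction k with
  | zero => intro i full acc h1 _; omega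
  | succ j ih =>
      intro i full acc _ hlen
      have hE : (j + 1) * m = j * m + m := by ring
      rcases Nat.eq_zero_or_pos j with rfl | hj
      · -- last row
        have hlen' : i + m = full.length := by omega
        have hdl : (full.drop i).length = m := by
          rw [List.length_drop]; omega
        rw [foldl_stepA_chunk_last (full.length : Int) (m : Int) (full.drop i) acc i
              (by rw [hdl]) (by exact_mod_cast hm) (by omega)]
        rw [show List.range 1 = [0] from rfl, List.map_cons, List.map_nil,
            PySem.Chars.join_singleton, Nat.zero_mul, Nat.add_zero,
            List.take_of_length_le hdl.le]
      · -- a middle row, then induction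
        have hpos : 0 < j * m := Nat.mul_pos hj (by omega)
        have him : i + m < full.length := by omega
        have hsplit : full.drop i = (full.drop i).take m ++ full.drop (i + m) := by
          conv_lhs => rw [← List.take_append_drop m (full.drop i)]
          rw [List.drop_drop]
        have hclen : ((full.drop i).take m).length = m := by
          rw [List.length_take, List.length_drop]; omega
        rw [hsplit, List.foldl_append]
        rw [foldl_stepA_chunk_mid (full.length : Int) (m : Int) ((full.drop i).take m) acc i
              (by rw [hclen]) (by exact_mod_cast hm) (by omega)]
        rw [show ((i : Int) + (m : Int)) = ((i + m : Nat) : Int) by push_cast; ring]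
        rw [ih (i + m) full (acc ++ (full.drop i).take m ++ ['\n']) hj (by omega)]
        rw [List.range_succ_eq_map, List.map_cons]
        rw [join_cons_of_ne_nil _ _ _ (by
          simp only [ne_eq, List.map_eq_nil_iff, List.range_eq_nil]
          omega)]
        rw [show (List.map (fun t => (full.drop (i + t * m)).take m)
              (List.map Nat.succ (List.range j)))
            = List.map (fun t => (full.drop (i + m + t * m)).take m) (List.range j) by
          rw [List.map_map]
          apply List.map_congr_left
          intro t _
          simp only [Function.comp_apply, Nat.succ_eq_add_one]
          congr 2
          ring]
        simp only [Nat.zero_mul, Nat.add_zero, List.append_assoc]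

-- pyRange with step m over a length k*m enumerates the k row starts.
lemma pyRange_chunks (m k : Nat) (hm : 0 < m) :
    PySem.List.pyRange 0 ((k * m : Nat) : Int) (m : Int)
      = (List.range k).map (fun t => ((t * m : Nat) : Int)) := by
  rw [PySem.List.pyRange_of_pos 0 ((k * m : Nat) : Int) (by exact_mod_cast hm)]
  rcases Nat.eq_zero_or_pos k with rfl | hk
  · simp
  · have hlt : (0 : Int) < ((k * m : Nat) : Int) := by
      push_cast; positivity
    rw [if_pos hlt]
    have harith : ((((k * m : Nat) : Int) - 0 + (m : Int) - 1) / (m : Int)) = (k : Int) := by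
      push_cast
      rw [show ((k : Int) * m - 0 + m - 1) = ((m : Int) - 1) + k * m by ring,
          Int.add_mul_ediv_right _ _ (by positivity : (m : Int) ≠ 0),
          Int.ediv_eq_zero_of_lt (by omega) (by omega)]
      ring
    rw [harith]
    simp only [Int.toNat_natCast]
    apply List.map_congr_left; intro t _; push_cast; ring

-- the core equality, one per admitted length, parametrised by the row count m
lemma case_eq (m : Nat) (hm : 2 ≤ m) (puzzle : String)
    (h : puzzle.toList.length = m * m) :
    String.ofList
        ((puzzle.toList.foldl (stepA (PySem.List.len puzzle.toList) ((m : Nat) : Int)) ([], 0, 0)).1)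
      = PySem.Str.join "\n"
          ((PySem.List.pyRange 0 (PySem.Str.len puzzle) ((m : Nat) : Int)).map
            (fun i => PySem.Str.slice puzzle (some i) (some (i + ((m : Nat) : Int))))) := by
  apply String.toList_inj.mp
  rw [String.toList_ofList, PySem.Str.toList_join, List.map_map]
  rw [show ("\n" : String).toList = ['\n'] from rfl]
  rw [show PySem.Str.len puzzle = ((m * m : Nat) : Int) by rw [PySem.Str.len_eq, h]]
  rw [show PySem.List.len puzzle.toList = ((puzzle.toList.length : Nat) : Int) by
    rw [PySem.List.len_eq]]
  rw [pyRange_chunks m m (by omega), List.map_map]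
  have hfold := loop_eq_join m hm m 0 puzzle.toList [] (by omega) (by omega)
  rw [List.drop_zero] at hfold
  rw [show ((0 : Nat) : Int) = (0 : Int) from rfl] at hfold
  rw [hfold, List.nil_append]
  congr 1
  apply List.map_congr_left
  intro t _
  simp only [Function.comp_apply]
  rw [show (((t * m : Nat) : Int) + ((m : Nat) : Int)) = ((t * m + m : Nat) : Int) by push_cast; ring]
  rw [PySem.Str.toList_slice, PySem.Chars.slice_eq_listSlice,
      PySem.List.slice_natCast, Nat.zero_add]
  congr 1
  omega

-- ===== VERDICT (by name: the statement is the Claim_ definition above) =====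
theorem rows_from_puzzle_spec : Claim_equal_rows_from_puzzle := by
  intro puzzle _ hpre
  unfold Spec_rows_from_puzzle
  unfold rows_from_puzzle rows_from_puzzle_alt
  rcases hpre with h | h | h | h | h
  · rw [show PySem.Dict.get? rootdict (PySem.Int.toStr (PySem.Str.len puzzle)) = some 2 by
      rw [PySem.Str.len_eq, h]; rfl]
    simpa using case_eq 2 (by omega) puzzle (by omega)
  · rw [show PySem.Dict.get? rootdict (PySem.Int.toStr (PySem.Str.len puzzle)) = some 3 by
      rw [PySem.Str.len_eq, h]; rfl]
    simpa using case_eq 3 (by omega) puzzle (by omega)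
  · rw [show PySem.Dict.get? rootdict (PySem.Int.toStr (PySem.Str.len puzzle)) = some 4 by
      rw [PySem.Str.len_eq, h]; rfl]
    simpa using case_eq 4 (by omega) puzzle (by omega)
  · rw [show PySem.Dict.get? rootdict (PySem.Int.toStr (PySem.Str.len puzzle)) = some 5 by
      rw [PySem.Str.len_eq, h]; rfl]
    simpa using case_eq 5 (by omega) puzzle (by omega)
  · rw [show PySem.Dict.get? rootdict (PySem.Int.toStr (PySem.Str.len puzzle)) = some 6 by
      rw [PySem.Str.len_eq, h]; rfl]
    simpa using case_eq 6 (by omega) puzzle (by omega)
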